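-- pv_equiv track=rewrite | github.com/chy-chiu/VizCOM | cardiacmap/transforms.py | CalculateAPD_DI
-- ===== SOURCE A (Python) =====
-- def CalculateAPD_DI(intersections, firstIntervalFlag):
--     """Function to measure the intervals between intersections and store interval time as apd/di
--     Args:
--         intersections (array): intersections found by GetIntersectionsAPD_DI()
--         firstIntervalFlag (array): bool array indicating whether first interval of a signal is apd/di
--     """
--     apdArr = [[] for s in range(len(intersections))]
--     apdIdxArr = [[] for s in range(len(intersections))]
--     diArr = [[] for s in range(len(intersections))]
--     diIdxArr = [[] for s in range(len(intersections))]
--     for sig in range(len(intersections)):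
--         # get this signals intersections
--         signalIndices = intersections[sig]
--         # check if the first interval is an apd or di
--         apdEvens = firstIntervalFlag[sig]
--         for i in range(1, len(signalIndices)):
--             index0 = signalIndices[i - 1]
--             index1 = signalIndices[i]
--             duration = index1 - index0
--
--             # append duration and starting index of interval to appropriate array
--             if i % 2 == 0:
--                 if apdEvens:
--                     apdArr[sig].append(duration)
--                     apdIdxArr[sig].append(index0)
--                 else:
--                     diArr[sig].append(duration)
--                     diIdxArr[sig].append(index0)
--             else:
--                 if apdEvens:
--                     diArr[sig].append(duration)
--                     diIdxArr[sig].append(index0)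
--                 else:
--                     apdArr[sig].append(duration)
--                     apdIdxArr[sig].append(index0)
--     return apdArr, apdIdxArr, diArr, diIdxArr
-- ===== SOURCE B (Python) =====
-- def _alternate(items):
--     """Split items into (elements at even positions, elements at odd positions)
--     with one pass and an accumulator swap (no per-element parity test)."""
--     a, b = [], []
--     for x in items:
--         a.append(x)
--         a, b = b, a
--     return (a, b) if len(items) % 2 == 0 else (b, a)
--
--
-- def CalculateAPD_DI(intersections, firstIntervalFlag):
--     apdArr, apdIdxArr, diArr, diIdxArr = [], [], [], []
--     for signalIndices, apdEvens in zip(intersections, firstIntervalFlag):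
--         intervals = [(b - a, a) for a, b in zip(signalIndices, signalIndices[1:])]
--         evens, odds = _alternate(intervals)
--         apdPairs, diPairs = (odds, evens) if apdEvens else (evens, odds)
--         apdArr.append([d for d, _ in apdPairs])
--         apdIdxArr.append([s for _, s in apdPairs])
--         diArr.append([d for d, _ in diPairs])
--         diIdxArr.append([s for _, s in diPairs])
--     return apdArr, apdIdxArr, diArr, diIdxArr
-- ===== Notes on version B (the rewrite author's own statement) =====
-- stated objective: alternative
-- what changed: A walks indices 1..len with a per-element parity test (i % 2) and a nested flag branch deciding per append; B pairs consecutive intersections via zip into (duration, start) tuples, splits them by an alternating accumulator-swap pass (no parity test), assigns the two halves to APD/DI once per signal, and unzips whole rows.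
import Mathlib
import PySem

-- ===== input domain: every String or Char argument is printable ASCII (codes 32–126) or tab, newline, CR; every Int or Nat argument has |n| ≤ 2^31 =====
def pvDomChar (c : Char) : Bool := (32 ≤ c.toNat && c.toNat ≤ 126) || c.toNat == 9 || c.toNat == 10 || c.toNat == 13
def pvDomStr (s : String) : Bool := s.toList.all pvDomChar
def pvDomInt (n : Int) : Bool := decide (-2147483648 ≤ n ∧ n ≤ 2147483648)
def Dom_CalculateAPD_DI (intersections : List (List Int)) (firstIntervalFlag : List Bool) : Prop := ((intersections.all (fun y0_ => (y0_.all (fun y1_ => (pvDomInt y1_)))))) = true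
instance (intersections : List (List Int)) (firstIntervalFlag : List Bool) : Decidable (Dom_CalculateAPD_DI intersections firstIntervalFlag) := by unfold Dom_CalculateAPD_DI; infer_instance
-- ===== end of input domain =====

-- B computes the same four arrays by pairing consecutive intersections with zip into
-- (duration, start) tuples, splitting them with an alternating accumulator-swap pass instead of
-- A's per-index parity test, and assigning/unzipping whole rows once per signal (objective: alternative).
-- ===== PORT A =====
-- the four result arrays (apdArr, apdIdxArr, diArr, diIdxArr) as one tuple state
abbrev pvSt : Type := List (List Int) × List (List Int) × List (List Int) × List (List Int)

-- arr[sig].append-style update: xs appended to row sig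
def pvAppL (arr : List (List Int)) (sig : Nat) (xs : List Int) : List (List Int) :=
  arr.set sig (arr.getD sig [] ++ xs)

-- body of A's inner loop (i runs over range(1, len(signalIndices)); both reads are in range there)
def pvStepA (signalIndices : List Int) (apdEvens : Bool) (sig : Nat) (st : pvSt) (i : Int) : pvSt :=
  let index0 := PySem.List.pyGetD signalIndices (i - 1) 0
  let index1 := PySem.List.pyGetD signalIndices i 0
  let duration := index1 - index0
  if PySem.Int.mod i 2 == 0 then
    if apdEvens then (pvAppL st.1 sig [duration], pvAppL st.2.1 sig [index0], st.2.2.1, st.2.2.2)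
    else (st.1, st.2.1, pvAppL st.2.2.1 sig [duration], pvAppL st.2.2.2 sig [index0])
  else
    if apdEvens then (st.1, st.2.1, pvAppL st.2.2.1 sig [duration], pvAppL st.2.2.2 sig [index0])
    else (pvAppL st.1 sig [duration], pvAppL st.2.1 sig [index0], st.2.2.1, st.2.2.2)

def CalculateAPD_DI (intersections : List (List Int)) (firstIntervalFlag : List Bool) :
    List (List Int) × List (List Int) × List (List Int) × List (List Int) :=
  let n := intersections.length
  (List.range n).foldl
    (fun st sig =>
      let signalIndices := intersections.getD sig []
      let apdEvens := firstIntervalFlag.getD sig false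
      (PySem.List.pyRange 1 (signalIndices.length : Int) 1).foldl (pvStepA signalIndices apdEvens sig) st)
    (List.replicate n [], List.replicate n [], List.replicate n [], List.replicate n [])

-- ===== PORT B =====
-- _alternate: one swap-pass split into (even positions, odd positions)
def pvAlternate {α : Type} (items : List α) : List α × List α :=
  let p := items.foldl (fun (p : List α × List α) x => (p.2, p.1 ++ [x])) (([] : List α), ([] : List α))
  if items.length % 2 == 0 then p else (p.2, p.1)

-- body of B's loop over zip(intersections, firstIntervalFlag)
def pvStepB (st : pvSt) (sp : List Int × Bool) : pvSt :=
  let intervals := (sp.1.zip (PySem.List.slice sp.1 (some 1) none)).map (fun ab => (ab.2 - ab.1, ab.1))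
  let eo := pvAlternate intervals
  let ad := if sp.2 then (eo.2, eo.1) else (eo.1, eo.2)
  (st.1 ++ [ad.1.map Prod.fst], st.2.1 ++ [ad.1.map Prod.snd],
   st.2.2.1 ++ [ad.2.map Prod.fst], st.2.2.2 ++ [ad.2.map Prod.snd])

def CalculateAPD_DI_alt (intersections : List (List Int)) (firstIntervalFlag : List Bool) :
    List (List Int) × List (List Int) × List (List Int) × List (List Int) :=
  (intersections.zip firstIntervalFlag).foldl pvStepB ([], [], [], [])

-- selected pair groups for one signal

-- ===== PRECONDITION & SPEC =====
-- A reads firstIntervalFlag[sig] for every sig < len(intersections): it raises IndexError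
-- exactly when firstIntervalFlag is shorter than intersections, and that is all Pre_ excludes.
def Pre_CalculateAPD_DI (intersections : List (List Int)) (firstIntervalFlag : List Bool) : Prop :=
  intersections.length ≤ firstIntervalFlag.length
instance (intersections : List (List Int)) (firstIntervalFlag : List Bool) : Decidable (Pre_CalculateAPD_DI intersections firstIntervalFlag) := by unfold Pre_CalculateAPD_DI; infer_instance

def pvWitness_CalculateAPD_DI : List (List Int) × List Bool :=
  ([[0, 3, 10, 14], [2, 5]], [true, false])

def Spec_CalculateAPD_DI (intersections : List (List Int)) (firstIntervalFlag : List Bool) (out : List (List Int) × List (List Int) × List (List Int) × List (List Int)) : Prop := out = CalculateAPD_DI_alt intersections firstIntervalFlag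
instance (intersections : List (List Int)) (firstIntervalFlag : List Bool) (out : List (List Int) × List (List Int) × List (List Int) × List (List Int)) : Decidable (Spec_CalculateAPD_DI intersections firstIntervalFlag out) := by unfold Spec_CalculateAPD_DI; infer_instance

-- ===== CLAIM (what is proved, stated in full; the proofs are below) =====
def Claim_equal_CalculateAPD_DI : Prop := ∀ (intersections : List (List Int)) (firstIntervalFlag : List Bool), Dom_CalculateAPD_DI intersections firstIntervalFlag → Pre_CalculateAPD_DI intersections firstIntervalFlag → Spec_CalculateAPD_DI intersections firstIntervalFlag (CalculateAPD_DI intersections firstIntervalFlag)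

-- ===== LEMMAS AND PROOFS =====
-- proof-side spec: alternate split by structural recursion (fg = current element goes to group 1)
def pvSplit {α : Type} : List α → Bool → List α × List α
  | [], _ => ([], [])
  | p :: t, fg =>
      let xy := pvSplit t (!fg)
      if fg then (p :: xy.1, xy.2) else (xy.1, p :: xy.2)

-- proof-side spec: the (duration, start) pairs of one signal
def pvPairs (xs : List Int) : List (Int × Int) :=
  (xs.zip xs.tail).map (fun ab => (ab.2 - ab.1, ab.1))

-- proof-side: A's inner loop re-expressed over the pairs list (fg ↔ current index i is odd)
def pvAuxA (ae : Bool) (sig : Nat) : List (Int × Int) → Bool → pvSt → pvSt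
  | [], _, st => st
  | p :: t, fg, st =>
      pvAuxA ae sig t (!fg)
        (if fg != ae then (pvAppL st.1 sig [p.1], pvAppL st.2.1 sig [p.2], st.2.2.1, st.2.2.2)
         else (st.1, st.2.1, pvAppL st.2.2.1 sig [p.1], pvAppL st.2.2.2 sig [p.2]))

-- the pair groups that end up in the apd / di arrays for one signal
def pvApdOf (xs : List Int) (ae : Bool) : List (Int × Int) :=
  if ae then (pvSplit (pvPairs xs) true).2 else (pvSplit (pvPairs xs) true).1
def pvDiOf (xs : List Int) (ae : Bool) : List (Int × Int) :=
  if ae then (pvSplit (pvPairs xs) true).1 else (pvSplit (pvPairs xs) true).2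

lemma pvAppL_oob (arr : List (List Int)) (sig : Nat) (xs : List Int) (h : arr.length ≤ sig) :
    pvAppL arr sig xs = arr := by
  rw [pvAppL, List.set_eq_of_length_le h]

lemma pvAppL_nil (arr : List (List Int)) (sig : Nat) : pvAppL arr sig [] = arr := by
  by_cases h : sig < arr.length
  · simp [pvAppL, List.getD_eq_getElem?_getD, List.getElem?_eq_getElem h]
  · exact pvAppL_oob _ _ _ (by omega)

lemma pvAppL_append (arr : List (List Int)) (sig : Nat) (xs ys : List Int) :
    pvAppL (pvAppL arr sig xs) sig ys = pvAppL arr sig (xs ++ ys) := by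
  by_cases h : sig < arr.length
  · simp [pvAppL, List.getD_eq_getElem?_getD, h, List.set_set]
  · rw [pvAppL_oob arr sig xs (by omega), pvAppL_oob arr sig ys (by omega), pvAppL_oob arr sig (xs ++ ys) (by omega)]

lemma pvSplit_not {α : Type} (t : List α) : ∀ (fg : Bool),
    pvSplit t (!fg) = ((pvSplit t fg).2, (pvSplit t fg).1) := by
  induction t with
  | nil => intro fg; simp [pvSplit]
  | cons p t ih =>
      intro fg
      have h1 := ih true
      have h0 := ih false
      simp at h1 h0
      cases fg
      · simp [pvSplit, h1]
      · simp [pvSplit, h0]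

lemma pvAuxA_eq (ae : Bool) (sig : Nat) (ps : List (Int × Int)) :
    ∀ (fg : Bool) (st : pvSt),
    pvAuxA ae sig ps fg st =
      (pvAppL st.1 sig ((if ae then (pvSplit ps fg).2 else (pvSplit ps fg).1).map Prod.fst),
       pvAppL st.2.1 sig ((if ae then (pvSplit ps fg).2 else (pvSplit ps fg).1).map Prod.snd),
       pvAppL st.2.2.1 sig ((if ae then (pvSplit ps fg).1 else (pvSplit ps fg).2).map Prod.fst),
       pvAppL st.2.2.2 sig ((if ae then (pvSplit ps fg).1 else (pvSplit ps fg).2).map Prod.snd)) := by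
  induction ps with
  | nil => intro fg st; simp [pvAuxA, pvSplit, pvAppL_nil]
  | cons p t ih =>
      intro fg st
      cases fg <;> cases ae <;>
        simp [pvAuxA, pvSplit, ih, pvAppL_append] <;> rfl

lemma pvPairs_length (xs : List Int) : (pvPairs xs).length = xs.length - 1 := by
  simp [pvPairs]

lemma pvPairs_getElem (xs : List Int) (j : Nat) (h : j + 1 < xs.length) :
    (pvPairs xs)[j]'(by rw [pvPairs_length]; omega) =
      (xs[j + 1]'h - xs[j]'(by omega), xs[j]'(by omega)) := by
  simp [pvPairs, List.getElem_zip, List.getElem_tail]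

lemma pvInner_gen (xs : List Int) (ae : Bool) (sig : Nat) :
    ∀ (m a : Nat), xs.length - a = m → 1 ≤ a → ∀ st : pvSt,
    (PySem.List.pyRange (a : Int) (xs.length : Int) 1).foldl (pvStepA xs ae sig) st =
      pvAuxA ae sig ((pvPairs xs).drop (a - 1)) (a % 2 == 1) st := by
  intro m
  induction m with
  | zero =>
      intro a hm ha st
      rw [PySem.List.pyRange_one_eq_nil (by exact_mod_cast (by omega : xs.length ≤ a)),
          List.drop_eq_nil_of_le (by rw [pvPairs_length]; omega)]
      rfl
  | succ m ih =>
      intro a hm ha st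
      have hlt : a < xs.length := by omega
      rw [PySem.List.pyRange_one_cons (by exact_mod_cast hlt)]
      simp only [List.foldl_cons]
      rw [show ((a : Int) + 1) = ((a + 1 : Nat) : Int) by push_cast; ring]
      rw [ih (a + 1) (by omega) (by omega)]
      have hj : a - 1 < (pvPairs xs).length := by rw [pvPairs_length]; omega
      rw [List.drop_eq_getElem_cons hj]
      have hgp : (pvPairs xs)[a - 1] = (xs[a]'hlt - xs[a-1]'(by omega), xs[a-1]'(by omega)) := by
        have := pvPairs_getElem xs (a - 1) (by omega)
        simpa [show a - 1 + 1 = a by omega] using this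
      have hmod : PySem.Int.mod (a : Int) 2 = ((a % 2 : Nat) : Int) := by
        exact_mod_cast PySem.Int.mod_natCast a 2
      have hg0 : PySem.List.pyGetD xs ((a : Int) - 1) 0 = xs[a-1]'(by omega) := by
        rw [show ((a : Int) - 1) = ((a - 1 : Nat) : Int) by omega, PySem.List.pyGetD_natCast,
            List.getD_eq_getElem]
      have hg1 : PySem.List.pyGetD xs (a : Int) 0 = xs[a]'hlt := by
        rw [PySem.List.pyGetD_natCast, List.getD_eq_getElem]
      rw [show a + 1 - 1 = a by omega, show (a - 1) + 1 = a by omega]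
      rcases Nat.mod_two_eq_zero_or_one a with hp | hp <;>
        · simp only [pvAuxA, pvStepA, hgp, hmod, hg0, hg1, hp]
          cases ae <;> simp [show (a+1) % 2 = 1 - a % 2 by omega, hp]

lemma pvInner_eq (xs : List Int) (ae : Bool) (sig : Nat) (st : pvSt) :
    (PySem.List.pyRange 1 (xs.length : Int) 1).foldl (pvStepA xs ae sig) st =
      pvAuxA ae sig (pvPairs xs) true st := by
  have := pvInner_gen xs ae sig (xs.length - 1) 1 rfl (by omega) st
  simpa using this

lemma pvFoldl4 {α β : Type} (g1 g2 g3 g4 : α → β → α) (l : List β) :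
    ∀ (a b c d : α),
    l.foldl (fun (st : α × α × α × α) x => (g1 st.1 x, g2 st.2.1 x, g3 st.2.2.1 x, g4 st.2.2.2 x)) (a, b, c, d) =
      (l.foldl g1 a, l.foldl g2 b, l.foldl g3 c, l.foldl g4 d) := by
  induction l with
  | nil => intro a b c d; rfl
  | cons x t ih => intro a b c d; simpa using ih (g1 a x) (g2 b x) (g3 c x) (g4 d x)

lemma pvFold_appL_snoc (f : Nat → List Int) (l : List Nat) :
    ∀ (arr : List (List Int)) (v : List Int), (∀ s ∈ l, s < arr.length) →
    l.foldl (fun arr sig => pvAppL arr sig (f sig)) (arr ++ [v]) =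
      l.foldl (fun arr sig => pvAppL arr sig (f sig)) arr ++ [v] := by
  induction l with
  | nil => intro arr v _; rfl
  | cons s t ih =>
      intro arr v h
      have hs : s < arr.length := h s (by simp)
      simp only [List.foldl_cons]
      have hstep : pvAppL (arr ++ [v]) s (f s) = pvAppL arr s (f s) ++ [v] := by
        rw [pvAppL, pvAppL, List.getD_eq_getElem?_getD, List.getD_eq_getElem?_getD,
            List.getElem?_append_left hs, List.set_append_left _ _ hs]
      rw [hstep, ih _ v (by intro x hx; rw [pvAppL, List.length_set]; exact h x (List.mem_cons_of_mem _ hx))]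

lemma pvFold_appL_range (f : Nat → List Int) :
    ∀ n : Nat,
    (List.range n).foldl (fun arr sig => pvAppL arr sig (f sig)) (List.replicate n ([] : List Int)) =
      (List.range n).map f := by
  intro n
  induction n with
  | zero => rfl
  | succ n ih =>
      rw [List.range_succ, List.replicate_succ', List.foldl_append,
          pvFold_appL_snoc f _ _ _ (by intro s hs; simp at hs; simpa using hs), ih]
      simp only [List.foldl_cons, List.foldl_nil]
      rw [pvAppL, List.getD_eq_getElem?_getD]
      have hlen : (List.map f (List.range n)).length = n := by simp
      rw [List.getElem?_append_right (by omega), List.set_append_right _ _ (by omega)]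
      simp [hlen, List.range_succ]

lemma pvAlternate_foldl {α : Type} (t : List α) :
    ∀ (a b : List α),
    t.foldl (fun (p : List α × List α) x => (p.2, p.1 ++ [x])) (a, b) =
      if t.length % 2 == 0 then (a ++ (pvSplit t true).1, b ++ (pvSplit t true).2)
      else (b ++ (pvSplit t true).2, a ++ (pvSplit t true).1) := by
  induction t with
  | nil => intro a b; simp [pvSplit]
  | cons x t ih =>
      intro a b
      have h2 : ((x :: t).length % 2 == 0) = !(t.length % 2 == 0) := by
        cases hb : t.length % 2 == 0 <;> simp [List.length_cons] at hb ⊢ <;> omega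
      simp only [List.foldl_cons, ih, pvSplit, h2, pvSplit_not t true]
      cases hb : t.length % 2 == 0 <;> simp [hb] <;> simp [List.append_assoc]

lemma pvAlternate_eq {α : Type} (items : List α) : pvAlternate items = pvSplit items true := by
  rw [pvAlternate]
  simp only [pvAlternate_foldl items [] []]
  cases hb : items.length % 2 == 0 <;> simp [hb]

lemma pvSnocMap {α β : Type} (l : List β) (f : β → α) :
    ∀ init : List α, l.foldl (fun acc x => acc ++ [f x]) init = init ++ l.map f := by
  induction l with
  | nil => intro init; simp
  | cons x t ih => intro init; simp [ih]

lemma pvMapRange_eq_mapZip {γ : Type} (inter : List (List Int)) (flags : List Bool)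
    (hpre : inter.length ≤ flags.length) (g : List Int → Bool → γ) :
    (List.range inter.length).map (fun sig => g (inter.getD sig []) (flags.getD sig false)) =
      (inter.zip flags).map (fun sp => g sp.1 sp.2) := by
  apply List.ext_getElem
  · simp; omega
  · intro k h1 h2
    have hk : k < inter.length := by simpa using h1
    have hkf : k < flags.length := by omega
    simp [List.getElem_zip, List.getD_eq_getElem?_getD, List.getElem?_eq_getElem hk,
          List.getElem?_eq_getElem hkf]

theorem pvMain_eq (intersections : List (List Int)) (firstIntervalFlag : List Bool)
    (hpre : intersections.length ≤ firstIntervalFlag.length) :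
    CalculateAPD_DI intersections firstIntervalFlag = CalculateAPD_DI_alt intersections firstIntervalFlag := by
  have hA : CalculateAPD_DI intersections firstIntervalFlag =
      (List.range intersections.length).foldl
        (fun (st : pvSt) sig =>
          (PySem.List.pyRange 1 (((intersections.getD sig []) : List Int).length : Int) 1).foldl
            (pvStepA (intersections.getD sig []) (firstIntervalFlag.getD sig false) sig) st)
        (List.replicate intersections.length [], List.replicate intersections.length [],
         List.replicate intersections.length [], List.replicate intersections.length []) := rfl
  have hB : CalculateAPD_DI_alt intersections firstIntervalFlag =
      (intersections.zip firstIntervalFlag).foldl pvStepB ([], [], [], []) := rfl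
  rw [hA, hB]
  have hstep : (fun (st : pvSt) sig =>
      (PySem.List.pyRange 1 (((intersections.getD sig []) : List Int).length : Int) 1).foldl
        (pvStepA (intersections.getD sig []) (firstIntervalFlag.getD sig false) sig) st) =
      fun (st : pvSt) (sig : Nat) =>
        (pvAppL st.1 sig ((pvApdOf (intersections.getD sig []) (firstIntervalFlag.getD sig false)).map Prod.fst),
         pvAppL st.2.1 sig ((pvApdOf (intersections.getD sig []) (firstIntervalFlag.getD sig false)).map Prod.snd),
         pvAppL st.2.2.1 sig ((pvDiOf (intersections.getD sig []) (firstIntervalFlag.getD sig false)).map Prod.fst),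
         pvAppL st.2.2.2 sig ((pvDiOf (intersections.getD sig []) (firstIntervalFlag.getD sig false)).map Prod.snd)) := by
    funext st sig
    rw [pvInner_eq, pvAuxA_eq]
    cases hae : firstIntervalFlag.getD sig false <;> simp [pvApdOf, pvDiOf]
  have hstepB : pvStepB =
      fun (st : pvSt) (sp : List Int × Bool) =>
        (st.1 ++ [(pvApdOf sp.1 sp.2).map Prod.fst],
         st.2.1 ++ [(pvApdOf sp.1 sp.2).map Prod.snd],
         st.2.2.1 ++ [(pvDiOf sp.1 sp.2).map Prod.fst],
         st.2.2.2 ++ [(pvDiOf sp.1 sp.2).map Prod.snd]) := by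
    funext st sp
    rw [pvStepB]
    simp only [PySem.List.slice_from_one, pvAlternate_eq]
    cases hae : sp.2 <;> simp [pvApdOf, pvDiOf, pvPairs]
  rw [hstep, hstepB,
      pvFoldl4 (fun a sig => pvAppL a sig ((pvApdOf (intersections.getD sig []) (firstIntervalFlag.getD sig false)).map Prod.fst))
        (fun a sig => pvAppL a sig ((pvApdOf (intersections.getD sig []) (firstIntervalFlag.getD sig false)).map Prod.snd))
        (fun a sig => pvAppL a sig ((pvDiOf (intersections.getD sig []) (firstIntervalFlag.getD sig false)).map Prod.fst))
        (fun a sig => pvAppL a sig ((pvDiOf (intersections.getD sig []) (firstIntervalFlag.getD sig false)).map Prod.snd))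
        (List.range intersections.length),
      pvFoldl4 (fun a sp => a ++ [(pvApdOf sp.1 sp.2).map Prod.fst])
        (fun a sp => a ++ [(pvApdOf sp.1 sp.2).map Prod.snd])
        (fun a sp => a ++ [(pvDiOf sp.1 sp.2).map Prod.fst])
        (fun a sp => a ++ [(pvDiOf sp.1 sp.2).map Prod.snd])
        (intersections.zip firstIntervalFlag),
      pvFold_appL_range, pvFold_appL_range, pvFold_appL_range, pvFold_appL_range,
      pvSnocMap (intersections.zip firstIntervalFlag) (fun sp => (pvApdOf sp.1 sp.2).map Prod.fst),
      pvSnocMap (intersections.zip firstIntervalFlag) (fun sp => (pvApdOf sp.1 sp.2).map Prod.snd),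
      pvSnocMap (intersections.zip firstIntervalFlag) (fun sp => (pvDiOf sp.1 sp.2).map Prod.fst),
      pvSnocMap (intersections.zip firstIntervalFlag) (fun sp => (pvDiOf sp.1 sp.2).map Prod.snd)]
  simp only [List.nil_append]
  refine Prod.ext ?_ (Prod.ext ?_ (Prod.ext ?_ ?_)) <;> dsimp only
  · exact pvMapRange_eq_mapZip intersections firstIntervalFlag hpre (fun xs ae => (pvApdOf xs ae).map Prod.fst)
  · exact pvMapRange_eq_mapZip intersections firstIntervalFlag hpre (fun xs ae => (pvApdOf xs ae).map Prod.snd)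
  · exact pvMapRange_eq_mapZip intersections firstIntervalFlag hpre (fun xs ae => (pvDiOf xs ae).map Prod.fst)
  · exact pvMapRange_eq_mapZip intersections firstIntervalFlag hpre (fun xs ae => (pvDiOf xs ae).map Prod.snd)

-- ===== VERDICT (by name: the statement is the Claim_ definition above) =====
theorem CalculateAPD_DI_spec : Claim_equal_CalculateAPD_DI := by
  intro intersections firstIntervalFlag _ hpre
  unfold Spec_CalculateAPD_DI
  exact pvMain_eq intersections firstIntervalFlag hpre
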